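-- pv_equiv track=rewrite | github.com/concomberjvck/practice | bot .py | eng_translator
-- ===== SOURCE A (Python) =====
-- def to_str(list):
--     string = ''
--     for i in list:
--         string += i + ' '
--     return string.strip()
--
-- def eng_translator(db, sequence):
--     ans = {}
--     items = db.items()
--     for k, v in items:
--         if sequence in v:
--             #key = get_key(db, ans, value)
--             if sequence not in ans.keys():
--                 ans.update({sequence : [k]})
--             else:
--                 ans[sequence].append(k)
--     if ans != {}:
--         return ans
--     words = sequence.split(' ')
--     length = len(words)
--     for i in range(length):
--         for j in reversed(range(i, length + 1)):
--             skey = to_str(words[i:j])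
--             for k, v in items:
--                 if skey in v:
--                     #key = get_key(db, ans, value)
--                     if skey not in ans.keys():
--                         ans.update({skey : [k]})
--                     elif k not in ans.values():
--                         ans[skey].append(k)
--     return ans
-- ===== SOURCE B (Python) =====
-- def eng_translator(db, sequence):
--     # Whole-sequence matches first (single comprehension over db).
--     keys = [k for k, v in db.items() if sequence in v]
--     if keys:
--         return {sequence: keys}
--     # Inverted index element -> list of keys (in db order), built once, so every
--     # word-span substring is answered by a single dict lookup instead of a db rescan.
--     index = {}
--     for k, v in db.items():
--         for w in dict.fromkeys(v):   # each distinct element of v, in order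
--             index.setdefault(w, []).append(k)
--     words = sequence.split(' ')
--     n = len(words)
--     ans = {}
--     for i in range(n):
--         for j in reversed(range(i, n + 1)):
--             skey = ' '.join(words[i:j]).strip()
--             ks = index.get(skey)
--             if ks is not None:
--                 if skey in ans:
--                     ans[skey].extend(ks)
--                 else:
--                     ans[skey] = list(ks)
--     return ans
-- ===== Notes on version B (the rewrite author's own statement) =====
-- stated objective: alternative
-- what changed: When the whole sequence matches nothing, B builds an inverted index element->keys over db once and answers every word-span substring by a single dict lookup, instead of A's rescan of all db items (with a linear list-membership test each) for every one of the O(n^2) substrings.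
import Mathlib
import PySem

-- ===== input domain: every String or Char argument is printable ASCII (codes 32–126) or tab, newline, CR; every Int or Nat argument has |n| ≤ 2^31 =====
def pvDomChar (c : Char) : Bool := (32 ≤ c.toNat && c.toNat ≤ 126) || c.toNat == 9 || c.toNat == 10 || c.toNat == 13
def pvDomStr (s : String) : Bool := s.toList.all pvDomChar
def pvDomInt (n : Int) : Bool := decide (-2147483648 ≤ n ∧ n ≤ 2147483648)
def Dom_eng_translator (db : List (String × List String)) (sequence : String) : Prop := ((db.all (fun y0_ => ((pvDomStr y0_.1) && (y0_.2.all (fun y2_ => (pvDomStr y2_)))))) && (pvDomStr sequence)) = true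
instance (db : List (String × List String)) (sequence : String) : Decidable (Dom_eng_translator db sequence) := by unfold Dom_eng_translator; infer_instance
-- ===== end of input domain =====

-- B answers a whole-sequence match with one comprehension, and otherwise replaces A's rescan
-- of all db items for every word-span substring by one inverted index element->keys built once
-- and a single lookup per substring (alternative algorithm).

-- ===== PORT A =====

-- string += i + ' ' over the list, then .strip()
def to_str (l : List String) : String :=
  PySem.Str.strip (l.foldl (fun s i => s ++ i ++ " ") "")

-- Python 'str == list' comparison is always False (different types); exact.
def pyEq_str_listStr (_ : String) (_ : List String) : Bool := false

def eng_translator (db : List (String × List String)) (sequence : String) : List (String × List String) :=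
  -- first loop: for k, v in items: if sequence in v: insert/append under key `sequence`
  let ans : PySem.Dict String (List String) :=
    db.foldl (fun ans kv =>
      if kv.2.contains sequence then
        if ans.contains sequence = false then ans.insert sequence [kv.1]
        else ans.modify sequence [] (· ++ [kv.1])
      else ans) PySem.Dict.empty
  if ans.items ≠ [] then ans.items   -- if ans != {}: return ans
  else
    let words := (PySem.Str.split? sequence " ").getD []   -- sep " " ≠ "" so split? = some; exact
    let length : Int := (words.length : Int)
    let ans2 : PySem.Dict String (List String) :=
      (PySem.List.pyRange 0 length 1).foldl (fun ans i =>
        ((PySem.List.pyRange i (length + 1) 1).reverse).foldl (fun ans j =>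
          let skey := to_str (PySem.List.slice words (some i) (some j))
          db.foldl (fun ans kv =>
            if kv.2.contains skey then
              if ans.contains skey = false then ans.insert skey [kv.1]
              else if (ans.values.any (pyEq_str_listStr kv.1)) = false then
                ans.modify skey [] (· ++ [kv.1])
              else ans
            else ans) ans) ans) PySem.Dict.empty
    ans2.items

-- ===== PORT B =====

def eng_translator_alt (db : List (String × List String)) (sequence : String) : List (String × List String) :=
  -- keys = [k for k, v in db.items() if sequence in v]
  let keys := (db.filter (fun kv => kv.2.contains sequence)).map (·.1)
  if keys ≠ [] then [(sequence, keys)]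
  else
    -- inverted index: for k, v: for w in dict.fromkeys(v): index.setdefault(w, []).append(k)
    -- (setdefault + in-place append ≡ Dict.modify w [] (· ++ [k]); exact)
    let index : PySem.Dict String (List String) :=
      db.foldl (fun idx kv =>
        (PySem.List.dedup kv.2).foldl (fun idx w => idx.modify w [] (· ++ [kv.1])) idx)
        PySem.Dict.empty
    let words := (PySem.Str.split? sequence " ").getD []   -- sep " " ≠ "" so split? = some; exact
    let n : Int := (words.length : Int)
    let ans : PySem.Dict String (List String) :=
      (PySem.List.pyRange 0 n 1).foldl (fun ans i =>
        ((PySem.List.pyRange i (n + 1) 1).reverse).foldl (fun ans j =>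
          let skey := PySem.Str.strip (PySem.Str.join " " (PySem.List.slice words (some i) (some j)))
          (match index.get? skey with
           | none => ans
           | some ks =>
             if ans.contains skey then ans.modify skey [] (· ++ ks)
             else ans.insert skey ks)) ans) PySem.Dict.empty
    ans.items

-- ===== PRECONDITION & SPEC =====
def Spec_eng_translator (db : List (String × List String)) (sequence : String) (out : List (String × List String)) : Prop := out = eng_translator_alt db sequence
instance (db : List (String × List String)) (sequence : String) (out : List (String × List String)) : Decidable (Spec_eng_translator db sequence out) := by unfold Spec_eng_translator; infer_instance

-- ===== CLAIM (what is proved, stated in full; the proofs are below) =====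
def Claim_equal_eng_translator : Prop := ∀ (db : List (String × List String)) (sequence : String), Dom_eng_translator db sequence → Spec_eng_translator db sequence (eng_translator db sequence)

-- ===== LEMMAS AND PROOFS =====

-- the keys of db whose value list contains w, in db order
def pvMatches (db : List (String × List String)) (w : String) : List String :=
  (db.filter (fun kv => kv.2.contains w)).map (·.1)

-- canonical "record all matches of skey" step both programs reduce to
def pvAddAll (d : PySem.Dict String (List String)) (c : String) (ks : List String) :
    PySem.Dict String (List String) :=
  if ks = [] then d
  else if d.contains c then d.modify c [] (· ++ ks)
  else d.insert c ks

theorem pv_insert_insert_self (d : PySem.Dict String (List String)) (k : String)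
    (v w : List String) : (d.insert k v).insert k w = d.insert k w := by
  by_cases h : d.contains k = true
  · apply PySem.Dict.ext
    have h2 : (d.insert k v).contains k = true := by simp [PySem.Dict.contains_insert]
    simp only [PySem.Dict.insert, h, if_true] at h2 ⊢
    simp only [h2, if_true]
    simp only [List.map_map, Function.comp_def]
    apply List.map_congr_left
    intro p _
    by_cases hp : (p.1 == k) = true <;> simp [hp]
  · apply PySem.Dict.ext
    have h2 : (d.insert k v).contains k = true := by simp [PySem.Dict.contains_insert]
    simp only [PySem.Dict.insert, h, if_false] at h2 ⊢
    simp only [h2, if_true]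
    simp only [Bool.false_eq_true, if_false, List.map_append, List.map_cons, List.map_nil]
    simp only [PySem.Dict.contains, List.any_eq_true] at h
    push_neg at h
    have hmap : List.map (fun p => if (p.1 == k) = true then (k, w) else p) d.items = d.items := by
      conv_rhs => rw [← List.map_id d.items]
      apply List.map_congr_left
      intro p hp
      have hne : ¬ (p.1 == k) = true := h p hp
      simp [hne]
    rw [hmap]
    simp

theorem pv_modify_insert_self (d : PySem.Dict String (List String)) (k : String)
    (v : List String) (f : List String → List String) :
    (d.insert k v).modify k [] f = d.insert k (f v) := by
  simp [PySem.Dict.modify, PySem.Dict.getD_insert_self, pv_insert_insert_self]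

theorem pv_modify_modify_self (d : PySem.Dict String (List String)) (k : String)
    (f g : List String → List String) :
    (d.modify k [] f).modify k [] g = d.modify k [] (fun x => g (f x)) := by
  simp [PySem.Dict.modify, PySem.Dict.getD_insert_self, pv_insert_insert_self]

theorem pv_get?_modify (d : PySem.Dict String (List String)) (k k' : String)
    (f : List String → List String) :
    (d.modify k [] f).get? k' = if k' = k then some (f (d.getD k [])) else d.get? k' := by
  simp [PySem.Dict.modify, PySem.Dict.get?_insert]

-- inner index loop: one key k, the distinct words ws of its value list
theorem pv_idx_inner (ws : List String) (h : ws.Nodup) (k : String)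
    (d : PySem.Dict String (List String)) (w : String) :
    (ws.foldl (fun d x => d.modify x [] (· ++ [k])) d).get? w
      = if w ∈ ws then some (d.getD w [] ++ [k]) else d.get? w := by
  induction ws generalizing d with
  | nil => simp
  | cons x t ih =>
    have hnd := h
    rw [List.nodup_cons] at hnd
    simp only [List.foldl_cons]
    rw [ih hnd.2]
    by_cases hw : w = x
    · subst hw
      simp [hnd.1, pv_get?_modify, PySem.Dict.getD_eq_get?_getD]
    · by_cases hm : w ∈ t
      · simp [hm, hw, PySem.Dict.getD_eq_get?_getD, pv_get?_modify]
      · simp [hm, hw, pv_get?_modify]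

-- the inverted index looked up at w returns exactly pvMatches db w (none if empty)
theorem pv_index_get? (db : List (String × List String)) (w : String)
    (d : PySem.Dict String (List String)) :
    ((db.foldl (fun idx kv =>
        (PySem.List.dedup kv.2).foldl (fun idx x => idx.modify x [] (· ++ [kv.1])) idx) d).get? w)
      = match d.get? w with
        | some b => some (b ++ pvMatches db w)
        | none => if pvMatches db w = [] then none else some (pvMatches db w) := by
  induction db generalizing d with
  | nil => cases hd : d.get? w <;> simp [pvMatches, hd]
  | cons kv t ih =>
    simp only [List.foldl_cons]
    rw [ih]
    have hnod := PySem.List.nodup_dedup (α := String) kv.2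
    have hinner := pv_idx_inner (PySem.List.dedup kv.2) hnod kv.1 d w
    by_cases hc : kv.2.contains w = true
    · have hmem : w ∈ PySem.List.dedup kv.2 := by
        rw [PySem.List.mem_dedup]; exact List.mem_of_elem_eq_true hc
      rw [if_pos hmem] at hinner
      rw [hinner]
      have hm : pvMatches (kv :: t) w = kv.1 :: pvMatches t w := by
        have hw : w ∈ kv.2 := List.mem_of_elem_eq_true hc
        simp [pvMatches, List.filter_cons, hw]
      rw [hm, PySem.Dict.getD_eq_get?_getD]
      cases hd : d.get? w <;> simp
    · have hmem : w ∉ PySem.List.dedup kv.2 := by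
        rw [PySem.List.mem_dedup]; intro hmm; exact hc (List.elem_eq_true_of_mem hmm)
      rw [if_neg hmem] at hinner
      rw [hinner]
      have hm : pvMatches (kv :: t) w = pvMatches t w := by
        have hw : w ∉ kv.2 := fun hmm => hc (List.elem_eq_true_of_mem hmm)
        simp [pvMatches, List.filter_cons, hw]
      rw [hm]

-- A's scan of db for one key c equals pvAddAll
theorem pv_scanA (db : List (String × List String)) (c : String)
    (ans : PySem.Dict String (List String)) :
    (db.foldl (fun ans kv =>
      if kv.2.contains c then
        if ans.contains c = false then ans.insert c [kv.1]
        else ans.modify c [] (· ++ [kv.1])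
      else ans) ans) = pvAddAll ans c (pvMatches db c) := by
  induction db generalizing ans with
  | nil => simp [pvMatches, pvAddAll]
  | cons kv t ih =>
    simp only [List.foldl_cons]
    by_cases hc : kv.2.contains c = true
    · have hw : c ∈ kv.2 := List.mem_of_elem_eq_true hc
      have hm : pvMatches (kv :: t) c = kv.1 :: pvMatches t c := by
        simp [pvMatches, List.filter_cons, hw]
      rw [hm]
      by_cases ha : ans.contains c = true
      · rw [if_pos hc, if_neg (by simp [ha])]
        rw [ih]
        have hca : (ans.modify c [] (· ++ [kv.1])).contains c = true := by
          simp [PySem.Dict.contains_modify]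
        by_cases hm0 : pvMatches t c = []
        · simp [pvAddAll, hm0, hca, ha]
        · simp only [pvAddAll, hm0, if_false, hca, if_true, ha, reduceIte]
          rw [pv_modify_modify_self]
          simp
      · have ha' : ans.contains c = false := by simpa using ha
        rw [if_pos hc, if_pos ha']
        rw [ih]
        have hca : (ans.insert c [kv.1]).contains c = true := by
          simp [PySem.Dict.contains_insert]
        by_cases hm0 : pvMatches t c = []
        · simp [pvAddAll, hm0, hca, ha']
        · simp only [pvAddAll, hm0, if_false, hca, if_true, ha', reduceIte]
          rw [pv_modify_insert_self]
          simp
    · have hw : c ∉ kv.2 := fun hmm => hc (List.elem_eq_true_of_mem hmm)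
      have hm : pvMatches (kv :: t) c = pvMatches t c := by
        simp [pvMatches, List.filter_cons, hw]
      rw [hm]
      simp only [hc]
      rw [if_neg (by simp)]
      exact ih ans

theorem pv_rstrip_append_space (x : List Char) :
    PySem.Chars.rstrip (x ++ [' ']) = PySem.Chars.rstrip x := by
  simp [PySem.Chars.rstrip, List.dropWhile_cons, show PySem.Chars.isspace ' ' = true from by decide]

theorem pv_strip_append_space (x : List Char) :
    PySem.Chars.strip (x ++ [' ']) = PySem.Chars.strip x := by
  simp only [PySem.Chars.strip, PySem.Chars.lstrip, List.dropWhile_append]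
  by_cases he : (List.dropWhile PySem.Chars.isspace x).isEmpty = true
  · rw [if_pos he]
    rw [List.isEmpty_iff] at he
    rw [he]
    simp [show PySem.Chars.isspace ' ' = true from by decide, PySem.Chars.rstrip]
  · rw [if_neg he]
    exact pv_rstrip_append_space _

theorem pv_foldl_toList (l : List String) (s0 : String) :
    (l.foldl (fun s i => s ++ i ++ " ") s0).toList
      = s0.toList ++ l.flatMap (fun i => i.toList ++ [' ']) := by
  induction l generalizing s0 with
  | nil => simp
  | cons a t ih => simp [ih, String.toList_append]

theorem pv_flatMap_space (ls : List (List Char)) :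
    ls.flatMap (fun cs => cs ++ [' '])
      = if ls = [] then [] else List.intercalate [' '] ls ++ [' '] := by
  induction ls with
  | nil => simp
  | cons a t ih =>
    cases t with
    | nil => simp [List.intercalate]
    | cons b u =>
      simp only [List.flatMap_cons] at ih ⊢
      rw [ih]
      have hi : [' '].intercalate (a::b::u) = a ++ [' '] ++ [' '].intercalate (b::u) := by
        simp [List.intercalate, List.intersperse]
      simp [hi]

theorem pv_tostr_eq (l : List String) :
    to_str l = PySem.Str.strip (PySem.Str.join " " l) := by
  unfold to_str PySem.Str.strip PySem.Str.join
  congr 1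
  have h1 : (l.foldl (fun s i => s ++ i ++ " ") "").toList
      = (l.map String.toList).flatMap (fun cs => cs ++ [' ']) := by
    rw [pv_foldl_toList]
    simp [List.flatMap_map]
  rw [h1, pv_flatMap_space]
  have h2 : (String.ofList (PySem.Chars.join " ".toList (List.map String.toList l))).toList
      = List.intercalate [' '] (l.map String.toList) := by
    rw [String.toList_ofList]
    simp [PySem.Chars.join]
  rw [h2]
  by_cases hl : l = []
  · subst hl; simp [List.intercalate]
  · rw [if_neg (by simpa using hl)]
    exact pv_strip_append_space _

-- ===== VERDICT (by name: the statement is the Claim_ definition above) =====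
-- A's phase-2 inner scan of db equals B's index lookup + insert/extend, for any key c
theorem pv_body_eq (db : List (String × List String)) (c : String)
    (ans : PySem.Dict String (List String)) :
    (db.foldl (fun ans kv =>
      if kv.2.contains c then
        if ans.contains c = false then ans.insert c [kv.1]
        else if (ans.values.any (pyEq_str_listStr kv.1)) = false then
          ans.modify c [] (· ++ [kv.1])
        else ans
      else ans) ans)
    = (match (if pvMatches db c = [] then none else some (pvMatches db c)) with
       | none => ans
       | some ks => if ans.contains c then ans.modify c [] (· ++ ks) else ans.insert c ks) := by
  have hstep : (fun (ans : PySem.Dict String (List String)) (kv : String × List String) =>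
      if kv.2.contains c then
        if ans.contains c = false then ans.insert c [kv.1]
        else if (ans.values.any (pyEq_str_listStr kv.1)) = false then
          ans.modify c [] (· ++ [kv.1])
        else ans
      else ans)
    = (fun ans kv =>
      if kv.2.contains c then
        if ans.contains c = false then ans.insert c [kv.1]
        else ans.modify c [] (· ++ [kv.1])
      else ans) := by
    funext ans kv
    simp [pyEq_str_listStr]
  rw [hstep, pv_scanA]
  by_cases hm : pvMatches db c = []
  · simp [pvAddAll, hm]
  · rw [if_neg hm]
    simp only [pvAddAll, hm, if_false]

-- ===== VERDICT (by name: the statement is the Claim_ definition above) =====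
theorem eng_translator_spec : Claim_equal_eng_translator := by
  intro db sequence _
  show eng_translator db sequence = eng_translator_alt db sequence
  simp only [eng_translator, eng_translator_alt]
  have hidx : ∀ w, (db.foldl (fun idx kv =>
      (PySem.List.dedup kv.2).foldl (fun idx w => idx.modify w [] (· ++ [kv.1])) idx)
      PySem.Dict.empty).get? w
      = if pvMatches db w = [] then none else some (pvMatches db w) := by
    intro w
    have h := pv_index_get? db w PySem.Dict.empty
    simpa [PySem.Dict.get?_empty] using h
  have hkeys : (db.filter (fun kv => kv.2.contains sequence)).map (·.1) = pvMatches db sequence := rfl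
  rw [hkeys]
  simp only [hidx]
  rw [pv_scanA]
  by_cases hm : pvMatches db sequence = []
  · have h1 : (pvAddAll PySem.Dict.empty sequence (pvMatches db sequence)).items = [] := by
      simp [pvAddAll, hm, PySem.Dict.empty]
    rw [h1]
    simp only [ne_eq, not_true_eq_false, if_false, hm, if_pos]
    -- phase 2 on both sides
    congr 1
    apply PySem.List.foldl_congr_mem
    intro ans i _
    apply PySem.List.foldl_congr_mem
    intro ans j _
    rw [← pv_tostr_eq, pv_body_eq]
  · have h1 : (pvAddAll PySem.Dict.empty sequence (pvMatches db sequence)).items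
        = [(sequence, pvMatches db sequence)] := by
      simp [pvAddAll, hm, PySem.Dict.empty, PySem.Dict.insert, PySem.Dict.contains]
    rw [h1]
    simp [hm]
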